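-- pv_equiv track=rewrite | github.com/sdwr/cowprofit | generate_prices.py | prune_list
-- ===== SOURCE A (Python) =====
-- def prune_list(entries, cutoff):
--     """
--     Keep entries within 7 days + 1 baseline entry beyond the window.
--     Returns list sorted newest-first.
--     """
--     if not entries:
--         return []
--
--     recent = [e for e in entries if e['t'] >= cutoff]
--     old = [e for e in entries if e['t'] < cutoff]
--
--     if old:
--         old.sort(key=lambda x: x['t'], reverse=True)
--         recent.append(old[0])
--
--     recent.sort(key=lambda x: x['t'], reverse=True)
--     return recent
-- ===== SOURCE B (Python) =====
-- def prune_list(entries, cutoff):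
--     """
--     Keep entries within the window + 1 baseline entry beyond it, newest-first.
--     One stable descending sort of everything, then a single scan that stops
--     right after the first below-cutoff entry (the newest old baseline).
--     """
--     out = []
--     for e in sorted(entries, key=lambda x: x['t'], reverse=True):
--         out.append(e)
--         if e['t'] < cutoff:
--             break
--     return out
-- ===== Notes on version B (the rewrite author's own statement) =====
-- stated objective: simpler
-- what changed: Instead of partitioning into recent/old lists and sorting each part (sorting old only to take its maximum, then re-sorting recent after appending the baseline), B does one stable descending sort of all entries and a single scan that stops right after the first below-cutoff entry.
import Mathlib
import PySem

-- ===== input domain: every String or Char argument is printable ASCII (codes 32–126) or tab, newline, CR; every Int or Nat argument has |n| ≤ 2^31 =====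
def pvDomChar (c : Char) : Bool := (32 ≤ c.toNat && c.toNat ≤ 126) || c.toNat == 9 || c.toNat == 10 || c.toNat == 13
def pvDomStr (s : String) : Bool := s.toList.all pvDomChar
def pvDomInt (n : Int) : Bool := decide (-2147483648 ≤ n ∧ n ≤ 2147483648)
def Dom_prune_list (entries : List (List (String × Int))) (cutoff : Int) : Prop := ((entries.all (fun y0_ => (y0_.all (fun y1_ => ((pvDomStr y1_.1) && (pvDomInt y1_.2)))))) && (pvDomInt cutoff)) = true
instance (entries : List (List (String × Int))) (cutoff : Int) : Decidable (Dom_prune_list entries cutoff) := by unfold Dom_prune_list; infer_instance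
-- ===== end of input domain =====

-- B replaces A's partition-into-two-lists + two sorts + re-sort with one stable
-- descending sort of everything and a single scan that stops right after the first
-- below-cutoff entry; equal return values are proved on Pre_ (every entry has key "t").

-- ===== PORT A =====
-- e['t'] : first match in the association list (KeyError, i.e. missing "t", is excluded by Pre_;
-- the 0 default is never reached inside Pre_)
def tval : List (String × Int) → Int
  | [] => 0
  | (k, v) :: r => if k == "t" then v else tval r

def prune_list (entries : List (List (String × Int))) (cutoff : Int) : List (List (String × Int)) :=
  if entries = [] then []
  else
    let recent := entries.filter (fun e => cutoff ≤ tval e)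
    let old := entries.filter (fun e => tval e < cutoff)
    let recent2 :=
      match PySem.List.sorted old tval true with   -- 'if old: old.sort(reverse=True); recent.append(old[0])'
      | [] => recent
      | m :: _ => recent ++ [m]
    PySem.List.sorted recent2 tval true

-- ===== PORT B =====
-- the loop body: append e; break once e['t'] < cutoff
def collectB (cutoff : Int) : List (List (String × Int)) → List (List (String × Int))
  | [] => []
  | e :: rest => if cutoff ≤ tval e then e :: collectB cutoff rest else [e]

def prune_list_alt (entries : List (List (String × Int))) (cutoff : Int) : List (List (String × Int)) :=
  collectB cutoff (PySem.List.sorted entries tval true)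

-- ===== PRECONDITION & SPEC =====
-- Pre_ excludes exactly the entries without a "t" key, on which Python A raises KeyError.
def Pre_prune_list (entries : List (List (String × Int))) (cutoff : Int) : Prop :=
  ∀ e ∈ entries, "t" ∈ e.map Prod.fst
instance (entries : List (List (String × Int))) (cutoff : Int) : Decidable (Pre_prune_list entries cutoff) := by unfold Pre_prune_list; infer_instance

def pvWitness_prune_list : (List (List (String × Int))) × Int :=
  ([[("t", 5), ("p", 1)], [("t", 1)], [("t", 0)], [("t", 9)]], 2)

def Spec_prune_list (entries : List (List (String × Int))) (cutoff : Int) (out : List (List (String × Int))) : Prop := out = prune_list_alt entries cutoff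
instance (entries : List (List (String × Int))) (cutoff : Int) (out : List (List (String × Int))) : Decidable (Spec_prune_list entries cutoff out) := by unfold Spec_prune_list; infer_instance

-- ===== CLAIM (what is proved, stated in full; the proofs are below) =====
def Claim_equal_prune_list : Prop := ∀ (entries : List (List (String × Int))) (cutoff : Int), Dom_prune_list entries cutoff → Pre_prune_list entries cutoff → Spec_prune_list entries cutoff (prune_list entries cutoff)

-- ===== LEMMAS AND PROOFS =====

-- inserting x before all of B leaves B as a suffix
theorem insertBy_append_of_before {α : Type} (bef : α → α → Bool) (x : α) (A B : List α)
    (h : ∀ b ∈ B, bef x b = true) :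
    PySem.List.insertBy bef x (A ++ B) = PySem.List.insertBy bef x A ++ B := by
  induction A with
  | nil =>
    cases B with
    | nil => rfl
    | cons b B' => simp [PySem.List.insertBy, h b (by simp)]
  | cons a A' ih =>
    simp only [List.cons_append, PySem.List.insertBy]
    by_cases hx : bef x a = true <;> simp [hx, ih]

-- inserting x after all of A leaves A as a prefix
theorem insertBy_append_of_not_before {α : Type} (bef : α → α → Bool) (x : α) (A B : List α)
    (h : ∀ a ∈ A, bef x a = false) :
    PySem.List.insertBy bef x (A ++ B) = A ++ PySem.List.insertBy bef x B := by
  induction A with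
  | nil => rfl
  | cons a A' ih =>
    simp only [List.cons_append, PySem.List.insertBy, h a (by simp)]
    simp only [Bool.false_eq_true, if_false, List.cons.injEq, true_and]
    exact ih (fun a ha => h a (by simp [ha]))

theorem sorted_rev_concat (xs : List (List (String × Int))) (x : List (String × Int)) :
    PySem.List.sorted (xs ++ [x]) tval true =
    PySem.List.insertBy (fun a b => decide (tval b < tval a)) x (PySem.List.sorted xs tval true) := by
  rw [PySem.List.sorted_rev_eq_foldl_insertBy, PySem.List.sorted_rev_eq_foldl_insertBy,
    List.foldl_append]
  rfl

-- the stable descending sort splits across the cutoff partition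
theorem sorted_split (cutoff : Int) (es : List (List (String × Int))) :
    PySem.List.sorted es tval true =
    PySem.List.sorted (es.filter (fun e => cutoff ≤ tval e)) tval true ++
    PySem.List.sorted (es.filter (fun e => tval e < cutoff)) tval true := by
  induction es using List.reverseRecOn with
  | nil => rfl
  | append_singleton es x ih =>
    by_cases hx : cutoff ≤ tval x
    · have hf1 : (es ++ [x]).filter (fun e => decide (cutoff ≤ tval e)) =
          es.filter (fun e => decide (cutoff ≤ tval e)) ++ [x] := by
        simp [List.filter_append, hx]
      have hf2 : (es ++ [x]).filter (fun e => decide (tval e < cutoff)) =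
          es.filter (fun e => decide (tval e < cutoff)) := by
        simp [List.filter_append, not_lt.mpr hx]
      rw [sorted_rev_concat, ih, hf1, hf2, sorted_rev_concat,
        insertBy_append_of_before]
      intro b hb
      have hb' := (PySem.List.mem_sorted _ _ _ b).mp hb
      have : tval b < cutoff := by
        have := List.of_mem_filter hb'
        simpa using this
      simp; omega
    · have hx' : tval x < cutoff := lt_of_not_ge hx
      have hf1 : (es ++ [x]).filter (fun e => decide (cutoff ≤ tval e)) =
          es.filter (fun e => decide (cutoff ≤ tval e)) := by
        simp [List.filter_append, hx]
      have hf2 : (es ++ [x]).filter (fun e => decide (tval e < cutoff)) =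
          es.filter (fun e => decide (tval e < cutoff)) ++ [x] := by
        simp [List.filter_append, hx']
      rw [sorted_rev_concat, ih, hf1, hf2, sorted_rev_concat,
        insertBy_append_of_not_before]
      intro a ha
      have ha' := (PySem.List.mem_sorted _ _ _ a).mp ha
      have : cutoff ≤ tval a := by
        have := List.of_mem_filter ha'
        simpa using this
      simp; omega

-- appending an element below everything then re-sorting just puts it at the end
theorem sorted_rev_append_min (ys : List (List (String × Int))) (m : List (String × Int))
    (h : ∀ y ∈ ys, ¬ tval y < tval m) :
    PySem.List.sorted (ys ++ [m]) tval true = PySem.List.sorted ys tval true ++ [m] := by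
  rw [sorted_rev_concat, PySem.List.insertBy_of_forall_not_before]
  intro y hy
  have := h y ((PySem.List.mem_sorted _ _ _ y).mp hy)
  simpa using this

-- B's scan over 'good prefix ++ bad suffix' keeps the prefix and the first bad element
theorem collectB_append (cutoff : Int) (A B : List (List (String × Int)))
    (hA : ∀ a ∈ A, cutoff ≤ tval a) (hB : ∀ b ∈ B, tval b < cutoff) :
    collectB cutoff (A ++ B) = A ++ B.take 1 := by
  induction A with
  | nil =>
    cases B with
    | nil => rfl
    | cons m B' => simp [collectB, not_le.mpr (hB m (by simp))]
  | cons a A' ih =>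
    simp only [List.cons_append, collectB, hA a (by simp), if_pos]
    simp [ih (fun a ha => hA a (by simp [ha]))]

-- ===== VERDICT (by name: the statement is the Claim_ definition above) =====
theorem prune_list_spec : Claim_equal_prune_list := by
  intro entries cutoff _ _
  unfold Spec_prune_list prune_list prune_list_alt
  by_cases hnil : entries = []
  · simp [hnil, PySem.List.sorted, collectB]
  · simp only [hnil, if_false]
    have hA : ∀ a ∈ PySem.List.sorted (entries.filter (fun e => cutoff ≤ tval e)) tval true,
        cutoff ≤ tval a := by
      intro a ha
      have := (PySem.List.mem_sorted _ _ _ a).mp ha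
      simpa using List.of_mem_filter this
    have hB : ∀ b ∈ PySem.List.sorted (entries.filter (fun e => tval e < cutoff)) tval true,
        tval b < cutoff := by
      intro b hb
      have := (PySem.List.mem_sorted _ _ _ b).mp hb
      simpa using List.of_mem_filter this
    rw [sorted_split cutoff entries, collectB_append cutoff _ _ hA hB]
    clear hA hB
    cases hso : PySem.List.sorted (entries.filter (fun e => tval e < cutoff)) tval true with
    | nil => simp
    | cons m rest =>
      have hm : tval m < cutoff := by
        have : m ∈ PySem.List.sorted (entries.filter (fun e => tval e < cutoff)) tval true := by
          rw [hso]; simp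
        have := (PySem.List.mem_sorted _ _ _ m).mp this
        simpa using List.of_mem_filter this
      simp only [List.take_succ_cons, List.take_zero]
      rw [sorted_rev_append_min]
      intro y hy
      have : cutoff ≤ tval y := by simpa using List.of_mem_filter hy
      omega
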